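-- pv_equiv track=rewrite | github.com/arthurelgindell/AYA_ALPHA | training/prepare_multiclass_detection.py | detect_attack_type_from_template
-- ===== SOURCE A (Python) =====
-- ATTACK_TYPE_PATTERNS = {
--     'sql_injection': ['sql', 'injection', 'query', 'select', 'union', 'drop', 'insert', 'database'],
--     'xss': ['xss', 'cross-site', 'script', 'javascript', 'alert', 'onerror', 'onclick'],
--     'phishing': ['phishing', 'phish', 'credential', 'fake', 'impersonat', 'social engineering'],
--     'command_injection': ['command', 'injection', 'exec', 'shell', 'system', 'os'],
--     'privilege_escalation': ['privilege', 'escalat', 'elevat', 'admin', 'root', 'suid'],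
--     'buffer_overflow': ['buffer', 'overflow', 'memory', 'segmentation', 'stack', 'heap'],
--     'dos': ['denial', 'service', 'dos', 'ddos', 'flood', 'amplification'],
--     'mitm': ['man-in-the-middle', 'mitm', 'intercept', 'eavesdrop', 'sniff'],
--     'path_traversal': ['path', 'traversal', 'directory', '../', '..\\', 'file inclusion'],
--     'malware': ['malware', 'virus', 'trojan', 'backdoor', 'ransomware']
-- }
--
-- def detect_attack_type_from_template(template):
--     """Detect attack type from template text"""
--     if not template:
--         return 'unknown'
--
--     template_lower = template.lower()
--
--     # Count matches for each attack type
--     scores = {}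
--     for attack_type, keywords in ATTACK_TYPE_PATTERNS.items():
--         score = sum(1 for keyword in keywords if keyword in template_lower)
--         if score > 0:
--             scores[attack_type] = score
--
--     # Return attack type with highest score
--     if scores:
--         return max(scores, key=scores.get)
--     return 'unknown'
-- ===== SOURCE B (Python) =====
-- ATTACK_TYPE_PATTERNS = {
--     'sql_injection': ['sql', 'injection', 'query', 'select', 'union', 'drop', 'insert', 'database'],
--     'xss': ['xss', 'cross-site', 'script', 'javascript', 'alert', 'onerror', 'onclick'],
--     'phishing': ['phishing', 'phish', 'credential', 'fake', 'impersonat', 'social engineering'],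
--     'command_injection': ['command', 'injection', 'exec', 'shell', 'system', 'os'],
--     'privilege_escalation': ['privilege', 'escalat', 'elevat', 'admin', 'root', 'suid'],
--     'buffer_overflow': ['buffer', 'overflow', 'memory', 'segmentation', 'stack', 'heap'],
--     'dos': ['denial', 'service', 'dos', 'ddos', 'flood', 'amplification'],
--     'mitm': ['man-in-the-middle', 'mitm', 'intercept', 'eavesdrop', 'sniff'],
--     'path_traversal': ['path', 'traversal', 'directory', '../', '..\\', 'file inclusion'],
--     'malware': ['malware', 'virus', 'trojan', 'backdoor', 'ransomware']
-- }
--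
-- # Inverted index: keyword -> list of attack types whose pattern list contains it
-- # (built once at module load).
-- _KEYWORD_INDEX = {}
-- for _attack_type, _keywords in ATTACK_TYPE_PATTERNS.items():
--     for _kw in _keywords:
--         _KEYWORD_INDEX.setdefault(_kw, []).append(_attack_type)
--
--
-- def detect_attack_type_from_template(template):
--     """Detect attack type from template text"""
--     if not template:
--         return 'unknown'
--
--     text = template.lower()
--
--     # One pass over the distinct keywords: collect the attack types hit
--     hits = []
--     for kw, types in _KEYWORD_INDEX.items():
--         if kw in text:
--             hits.extend(types)
--
--     # First attack type (in pattern order) with a positive, maximal hit count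
--     best, best_score = 'unknown', 0
--     for attack_type in ATTACK_TYPE_PATTERNS:
--         score = hits.count(attack_type)
--         if score > best_score:
--             best, best_score = attack_type, score
--     return best
-- ===== Notes on version B (the rewrite author's own statement) =====
-- stated objective: alternative
-- what changed: B precomputes an inverted keyword->attack-types index at module load, collects hit types in one pass over the distinct keywords, and picks the winner with a single strict-argmax scan in pattern order, instead of A's per-type score dict followed by max(scores, key=scores.get).
import Mathlib
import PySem

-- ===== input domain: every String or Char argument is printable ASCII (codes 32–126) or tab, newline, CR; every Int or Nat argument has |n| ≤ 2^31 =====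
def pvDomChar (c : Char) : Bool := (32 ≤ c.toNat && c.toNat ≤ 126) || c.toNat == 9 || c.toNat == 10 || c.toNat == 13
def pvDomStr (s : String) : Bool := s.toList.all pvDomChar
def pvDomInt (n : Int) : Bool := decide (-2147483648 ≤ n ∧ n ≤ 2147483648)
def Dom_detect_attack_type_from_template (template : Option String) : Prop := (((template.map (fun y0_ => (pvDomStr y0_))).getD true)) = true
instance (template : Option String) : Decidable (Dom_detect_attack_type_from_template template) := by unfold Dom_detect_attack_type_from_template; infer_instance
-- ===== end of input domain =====

-- B replaces A's per-type score dict + max(key=get) by an inverted keyword index, a flat hit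
-- list and one running strict-argmax scan over the pattern order (objective: alternative
-- decomposition, same cost class).

-- shared module constant (both Pythons read the same ATTACK_TYPE_PATTERNS)
def ATTACK_TYPE_PATTERNS : List (String × List String) := [
  ("sql_injection", ["sql", "injection", "query", "select", "union", "drop", "insert", "database"]),
  ("xss", ["xss", "cross-site", "script", "javascript", "alert", "onerror", "onclick"]),
  ("phishing", ["phishing", "phish", "credential", "fake", "impersonat", "social engineering"]),
  ("command_injection", ["command", "injection", "exec", "shell", "system", "os"]),
  ("privilege_escalation", ["privilege", "escalat", "elevat", "admin", "root", "suid"]),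
  ("buffer_overflow", ["buffer", "overflow", "memory", "segmentation", "stack", "heap"]),
  ("dos", ["denial", "service", "dos", "ddos", "flood", "amplification"]),
  ("mitm", ["man-in-the-middle", "mitm", "intercept", "eavesdrop", "sniff"]),
  ("path_traversal", ["path", "traversal", "directory", "../", "..\\", "file inclusion"]),
  ("malware", ["malware", "virus", "trojan", "backdoor", "ransomware"])]

-- ===== PORT A =====
def detect_attack_type_from_template (template : Option String) : String :=
  match template with
  | none => "unknown"
  | some t =>
    if t = "" then "unknown"
    else
      let template_lower := PySem.Str.lower t
      let scores : PySem.Dict String Int :=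
        ATTACK_TYPE_PATTERNS.foldl (fun sc p =>
          let score : Int :=
            (p.2.map (fun kw => if PySem.Str.isIn kw template_lower then (1 : Int) else 0)).sum
          if score > 0 then sc.insert p.1 score else sc) PySem.Dict.empty
      if scores.items ≠ [] then
        (PySem.List.max? scores.keys (fun k => scores.getD k 0)).getD "unknown"
      else "unknown"

-- ===== PORT B =====
-- _KEYWORD_INDEX is built once at module load by
--   `for at,kws in ATTACK_TYPE_PATTERNS.items(): for kw in kws: _KEYWORD_INDEX.setdefault(kw, []).append(at)`;
-- setdefault-then-append is exactly `modify kw [] (· ++ [at])`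
def KEYWORD_INDEX : PySem.Dict String (List String) :=
  ATTACK_TYPE_PATTERNS.foldl (fun d p =>
    p.2.foldl (fun d kw => d.modify kw [] (· ++ [p.1])) d) PySem.Dict.empty



def detect_attack_type_from_template_alt (template : Option String) : String :=
  match template with
  | none => "unknown"
  | some t =>
    if t = "" then "unknown"
    else
      let text := PySem.Str.lower t
      let hits : List String :=
        KEYWORD_INDEX.items.foldl (fun h q => if PySem.Str.isIn q.1 text then h ++ q.2 else h) []
      (ATTACK_TYPE_PATTERNS.foldl (fun best p =>
          let score : Int := (hits.count p.1 : Int)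
          if score > best.2 then (p.1, score) else best) (("unknown", 0) : String × Int)).1

-- ===== PRECONDITION & SPEC =====
def Spec_detect_attack_type_from_template (template : Option String) (out : String) : Prop := out = detect_attack_type_from_template_alt template
instance (template : Option String) (out : String) : Decidable (Spec_detect_attack_type_from_template template out) := by unfold Spec_detect_attack_type_from_template; infer_instance

-- ===== CLAIM (what is proved, stated in full; the proofs are below) =====
def Claim_equal_detect_attack_type_from_template : Prop := ∀ (template : Option String), Dom_detect_attack_type_from_template template → Spec_detect_attack_type_from_template template (detect_attack_type_from_template template)

-- ===== LEMMAS AND PROOFS =====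

-- counting one attack-type name through B's hit-collecting fold
theorem count_hits_fold (l : List (String × List String)) (pred : String → Bool)
    (h : List String) (a : String) :
    ((l.foldl (fun h q => if pred q.1 then h ++ q.2 else h) h).count a)
    = h.count a + (l.map (fun q => if pred q.1 then q.2.count a else 0)).sum := by
  induction l generalizing h with
  | nil => simp
  | cons q rest ih =>
    simp only [List.foldl_cons, List.map_cons, List.sum_cons, ih]
    by_cases hq : pred q.1 <;> simp [hq, List.count_append] <;> omega

-- B's strict-argmax scan ignores non-positive entries
theorem scan_filter_pos (l : List (String × Int)) (bs : String × Int) (hbs : 0 ≤ bs.2) :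
    l.foldl (fun bs p => if p.2 > bs.2 then p else bs) bs
    = (l.filter (fun p => p.2 > 0)).foldl (fun bs p => if p.2 > bs.2 then p else bs) bs := by
  induction l generalizing bs with
  | nil => simp
  | cons p rest ih =>
    by_cases hp : p.2 > 0
    · rw [List.filter_cons_of_pos (by simpa using hp)]
      simp only [List.foldl_cons]
      by_cases hgt : p.2 > bs.2
      · rw [if_pos hgt, ih p (by omega)]
      · rw [if_neg hgt, ih bs hbs]
    · have hno : ¬ p.2 > bs.2 := by omega
      simp only [List.filter_cons, List.foldl_cons, if_neg hno]
      rw [if_neg (by simpa using hp), ih bs hbs]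


-- A's conditional-insert loop over fresh distinct keys builds exactly the filtered item list
theorem items_cond_insert (l : List (String × Int)) (d : PySem.Dict String Int)
    (hfresh : ∀ p ∈ l, d.contains p.1 = false) (hnd : (l.map (·.1)).Nodup) :
    (l.foldl (fun d p => if p.2 > 0 then d.insert p.1 p.2 else d) d).items
    = d.items ++ l.filter (fun p => p.2 > 0) := by
  induction l generalizing d with
  | nil => simp
  | cons p rest ih =>
    simp only [List.map_cons, List.nodup_cons] at hnd
    by_cases hp : p.2 > 0
    · rw [List.filter_cons_of_pos (by simpa using hp)]
      simp only [List.foldl_cons, if_pos hp]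
      rw [ih (d.insert p.1 p.2)
          (by intro q hq
              rw [PySem.Dict.contains_insert]
              have h1 : d.contains q.1 = false := hfresh q (by simp [hq])
              have h2 : q.1 ≠ p.1 := by
                intro he; exact hnd.1 (he ▸ List.mem_map_of_mem hq)
              simp [h1, h2])
          hnd.2]
      rw [PySem.Dict.items_insert_of_not_contains d p.2 (hfresh p (by simp))]
      simp
    · rw [List.filter_cons_of_neg (by simpa using hp)]
      simp only [List.foldl_cons, if_neg hp]
      exact ih d (fun q hq => hfresh q (by simp [hq])) hnd.2

-- Python's max(keys, key=get): max? as a fold with an explicit step function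
def pvMaxStep (key : String → Int) : Option String → String → Option String :=
  fun acc x => match acc with
    | none => some x
    | some m => if key m < key x then some x else some m

theorem max?_eq_foldl (l : List String) (key : String → Int) :
    PySem.List.max? l key = l.foldl (pvMaxStep key) none := by
  unfold PySem.List.max? pvMaxStep
  congr 1
  funext acc x
  cases acc <;> rfl

theorem max?_aux (rest : List (String × Int)) (key : String → Int) (bs : String × Int)
    (hkey : ∀ p ∈ rest, key p.1 = p.2) (hbs : key bs.1 = bs.2) :
    rest.foldl (fun acc p => pvMaxStep key acc p.1) (some bs.1)
    = some ((rest.foldl (fun bs p => if p.2 > bs.2 then p else bs) bs).1) := by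
  induction rest generalizing bs with
  | nil => simp
  | cons p t ih =>
    simp only [List.foldl_cons]
    have hp := hkey p (by simp)
    have hstep : pvMaxStep key (some bs.1) p.1
        = if key bs.1 < key p.1 then some p.1 else some bs.1 := rfl
    rw [hstep]
    by_cases hgt : p.2 > bs.2
    · rw [if_pos (by rw [hbs, hp]; omega), if_pos hgt]
      exact ih p (fun q hq => hkey q (by simp [hq])) hp
    · rw [if_neg (by rw [hbs, hp]; omega), if_neg hgt]
      exact ih bs (fun q hq => hkey q (by simp [hq])) hbs

theorem max?_eq_scan (l : List (String × Int)) (key : String → Int)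
    (hkey : ∀ p ∈ l, key p.1 = p.2) (hpos : ∀ p ∈ l, 0 < p.2) (hne : l ≠ []) :
    (PySem.List.max? (l.map (·.1)) key).getD "unknown"
    = (l.foldl (fun bs p => if p.2 > bs.2 then p else bs) (("unknown", 0) : String × Int)).1 := by
  match l with
  | [] => exact absurd rfl hne
  | p :: t =>
    rw [max?_eq_foldl]
    simp only [List.map_cons, List.foldl_cons, List.foldl_map]
    have hp := hkey p (by simp)
    have hfirst : pvMaxStep key none p.1 = some p.1 := rfl
    rw [hfirst, max?_aux t key p (fun q hq => hkey q (by simp [hq])) hp]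
    have : (if p.2 > (0:Int) then p else (("unknown", 0) : String × Int)) = p :=
      if_pos (hpos p (by simp))
    rw [this]
    simp
-- the ten attack-type names are distinct
theorem names_nodup : (ATTACK_TYPE_PATTERNS.map (fun p => p.1)).Nodup := by decide
-- the inverted index, evaluated once to its literal item list
set_option maxRecDepth 10000 in
theorem idx_items : KEYWORD_INDEX.items = [
  ("sql", ["sql_injection"]),
  ("injection", ["sql_injection", "command_injection"]),
  ("query", ["sql_injection"]),
  ("select", ["sql_injection"]),
  ("union", ["sql_injection"]),
  ("drop", ["sql_injection"]),
  ("insert", ["sql_injection"]),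
  ("database", ["sql_injection"]),
  ("xss", ["xss"]),
  ("cross-site", ["xss"]),
  ("script", ["xss"]),
  ("javascript", ["xss"]),
  ("alert", ["xss"]),
  ("onerror", ["xss"]),
  ("onclick", ["xss"]),
  ("phishing", ["phishing"]),
  ("phish", ["phishing"]),
  ("credential", ["phishing"]),
  ("fake", ["phishing"]),
  ("impersonat", ["phishing"]),
  ("social engineering", ["phishing"]),
  ("command", ["command_injection"]),
  ("exec", ["command_injection"]),
  ("shell", ["command_injection"]),
  ("system", ["command_injection"]),
  ("os", ["command_injection"]),
  ("privilege", ["privilege_escalation"]),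
  ("escalat", ["privilege_escalation"]),
  ("elevat", ["privilege_escalation"]),
  ("admin", ["privilege_escalation"]),
  ("root", ["privilege_escalation"]),
  ("suid", ["privilege_escalation"]),
  ("buffer", ["buffer_overflow"]),
  ("overflow", ["buffer_overflow"]),
  ("memory", ["buffer_overflow"]),
  ("segmentation", ["buffer_overflow"]),
  ("stack", ["buffer_overflow"]),
  ("heap", ["buffer_overflow"]),
  ("denial", ["dos"]),
  ("service", ["dos"]),
  ("dos", ["dos"]),
  ("ddos", ["dos"]),
  ("flood", ["dos"]),
  ("amplification", ["dos"]),
  ("man-in-the-middle", ["mitm"]),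
  ("mitm", ["mitm"]),
  ("intercept", ["mitm"]),
  ("eavesdrop", ["mitm"]),
  ("sniff", ["mitm"]),
  ("path", ["path_traversal"]),
  ("traversal", ["path_traversal"]),
  ("directory", ["path_traversal"]),
  ("../", ["path_traversal"]),
  ("..\\", ["path_traversal"]),
  ("file inclusion", ["path_traversal"]),
  ("malware", ["malware"]),
  ("virus", ["malware"]),
  ("trojan", ["malware"]),
  ("backdoor", ["malware"]),
  ("ransomware", ["malware"])] := by rfl

set_option maxHeartbeats 1000000 in
theorem counts_eq (text : String) :
    ATTACK_TYPE_PATTERNS.map (fun p => ((p.1 : String),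
      ((KEYWORD_INDEX.items.foldl (fun h q => if PySem.Str.isIn q.1 text then h ++ q.2 else h) []).count p.1 : Int)))
    = ATTACK_TYPE_PATTERNS.map (fun p => (p.1,
      (p.2.map (fun kw => if PySem.Str.isIn kw text then (1 : Int) else 0)).sum)) := by
  rw [idx_items]
  apply List.map_congr_left
  intro p hp
  simp only [ATTACK_TYPE_PATTERNS, List.mem_cons, List.not_mem_nil, or_false] at hp
  rcases hp with rfl|rfl|rfl|rfl|rfl|rfl|rfl|rfl|rfl|rfl <;>
  · simp only [Prod.mk.injEq]
    refine ⟨trivial, ?_⟩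
    rw [count_hits_fold _ (fun kw => PySem.Str.isIn kw text)]
    simp
    ac_rfl

-- A's "filtered score dict then max(key=get)" equals B's single strict-argmax scan
theorem select_eq (L : List (String × Int)) (hnd : (L.map (fun q => q.1)).Nodup) :
    (if (L.foldl (fun d q => if q.2 > 0 then d.insert q.1 q.2 else d) PySem.Dict.empty).items ≠ [] then
       (PySem.List.max? (L.foldl (fun d q => if q.2 > 0 then d.insert q.1 q.2 else d) PySem.Dict.empty).keys
         (fun k => (L.foldl (fun d q => if q.2 > 0 then d.insert q.1 q.2 else d) PySem.Dict.empty).getD k 0)).getD "unknown"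
     else "unknown")
    = (L.foldl (fun bs q => if q.2 > bs.2 then q else bs) (("unknown", 0) : String × Int)).1 := by
  have hitems : (L.foldl (fun d q => if q.2 > 0 then d.insert q.1 q.2 else d) PySem.Dict.empty).items
      = L.filter (fun q => q.2 > 0) :=
    items_cond_insert L PySem.Dict.empty (fun q _ => by simp) hnd
  have hscan := scan_filter_pos L (("unknown", 0) : String × Int) (by norm_num)
  by_cases hq : L.filter (fun q => q.2 > 0) = []
  · rw [if_neg (by simp [hitems, hq]), hscan, hq]
    rfl
  · have hkeys : (L.foldl (fun d q => if q.2 > 0 then d.insert q.1 q.2 else d) PySem.Dict.empty).keys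
        = (L.filter (fun q => q.2 > 0)).map (fun q => q.1) := by
      simp only [PySem.Dict.keys, hitems]
    have hndk : (L.foldl (fun d q => if q.2 > 0 then d.insert q.1 q.2 else d) PySem.Dict.empty).keys.Nodup := by
      rw [hkeys]
      exact hnd.sublist (List.Sublist.map (fun (q : String × Int) => q.1) List.filter_sublist)
    have hkey : ∀ p ∈ L.filter (fun q => q.2 > 0),
        (L.foldl (fun d q => if q.2 > 0 then d.insert q.1 q.2 else d) PySem.Dict.empty).getD p.1 0 = p.2 := by
      intro p hp
      exact PySem.Dict.getD_of_mem_items _ (by rw [hitems]; exact hp) hndk 0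
    have hpos : ∀ p ∈ L.filter (fun q => q.2 > 0), 0 < p.2 := by
      intro p hp
      have := List.of_mem_filter hp
      simpa using this
    rw [if_pos (by rw [hitems]; exact hq), hkeys,
        max?_eq_scan (L.filter (fun q => q.2 > 0)) _ hkey hpos hq, hscan]

-- ===== VERDICT (by name: the statement is the Claim_ definition above) =====
set_option maxHeartbeats 2000000 in
set_option maxRecDepth 20000 in
theorem detect_attack_type_from_template_spec : Claim_equal_detect_attack_type_from_template := by
  intro template _
  unfold Spec_detect_attack_type_from_template
  match template with
  | none => rfl
  | some t =>
    by_cases ht : t = ""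
    · simp [detect_attack_type_from_template, detect_attack_type_from_template_alt, ht]
    · simp only [detect_attack_type_from_template, detect_attack_type_from_template_alt]
      rw [if_neg ht, if_neg ht]
      generalize hH : (KEYWORD_INDEX.items.foldl
        (fun h q => if PySem.Str.isIn q.1 (PySem.Str.lower t) then h ++ q.2 else h) ([] : List String)) = H
      have hA :
          (ATTACK_TYPE_PATTERNS.foldl (fun sc p =>
            if (List.map (fun kw => if PySem.Str.isIn kw (PySem.Str.lower t) then (1 : Int) else 0) p.2).sum > 0 then
              sc.insert p.1 (List.map (fun kw => if PySem.Str.isIn kw (PySem.Str.lower t) then (1 : Int) else 0) p.2).sum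
            else sc) PySem.Dict.empty)
          = ((ATTACK_TYPE_PATTERNS.map (fun p => (p.1,
              (List.map (fun kw => if PySem.Str.isIn kw (PySem.Str.lower t) then (1 : Int) else 0) p.2).sum))).foldl
              (fun d q => if q.2 > 0 then d.insert q.1 q.2 else d) PySem.Dict.empty) :=
        (List.foldl_map
          (f := fun (p : String × List String) => ((p.1 : String),
            (List.map (fun kw => if PySem.Str.isIn kw (PySem.Str.lower t) then (1 : Int) else 0) p.2).sum))
          (g := fun (d : PySem.Dict String Int) (q : String × Int) => if q.2 > 0 then d.insert q.1 q.2 else d)).symm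
      have hB :
          (ATTACK_TYPE_PATTERNS.foldl (fun best p =>
            if ((List.count p.1 H : Nat) : Int) > best.2 then
              (p.1, ((List.count p.1 H : Nat) : Int))
            else best) (("unknown", 0) : String × Int))
          = ((ATTACK_TYPE_PATTERNS.map (fun p => (p.1,
              ((List.count p.1 H : Nat) : Int)))).foldl
              (fun bs q => if q.2 > bs.2 then q else bs) (("unknown", 0) : String × Int)) :=
        (List.foldl_map
          (f := fun (p : String × List String) => ((p.1 : String),
            ((List.count p.1 H : Nat) : Int)))
          (g := fun (bs q : String × Int) => if q.2 > bs.2 then q else bs)).symm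
      have hnd' : ((ATTACK_TYPE_PATTERNS.map (fun p => (p.1,
          (List.map (fun kw => if PySem.Str.isIn kw (PySem.Str.lower t) then (1 : Int) else 0) p.2).sum))).map (fun q => q.1)).Nodup := by
        rw [List.map_map]
        exact names_nodup
      have hc := counts_eq (PySem.Str.lower t)
      rw [hH] at hc
      rw [hA, hB, hc]
      exact select_eq _ hnd'
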